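-- pv_equiv track=rewrite | github.com/fbm2718/QREM | ancillary_functions.py | register_names_qubits
-- ===== SOURCE A (Python) =====
-- def bit_strings(n, rev=False):
--     """Generate outcome bitstrings for n-qubits.
--
--     Args:
--         n (int): the number of qubits.
--
--     Returns:
--         list: arrray_to_print list of bitstrings ordered as follows:
--         Example: n=2 returns ['00', '01', '10', '11'].
-- """
--     if (rev == True):
--         return [(bin(j)[2:].zfill(n))[::-1] for j in list(range(2 ** n))]
--     else:
--         return [(bin(j)[2:].zfill(n)) for j in list(range(2 ** n))]
--
-- def register_names_qubits(qs, qrs, rev=False):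
--     if qrs == 0:
--         return ['']
--
--     if (qrs == 1):
--         return ['0', '1']
--
--     all_names = bit_strings(qrs, rev)
--     not_used = []
--
--     for j in list(range(qrs)):
--         if j not in qs:
--             not_used.append(j)
--
--     bad_names = []
--     for name in all_names:
--         for k in (not_used):
--             rev_name = name[::-1]
--             if (rev_name[k] == '1'):
--                 bad_names.append(name)
--
--     relevant_names = []
--     for name in all_names:
--         if name not in bad_names:
--             relevant_names.append(name)
--
--     return relevant_names
-- ===== SOURCE B (Python) =====
-- def register_names_qubits(qs, qrs, rev=False):
--     # bitmask of forbidden bit positions of the counter j (rev mirrors string positions)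
--     mask = 0
--     for k in range(qrs):
--         if k not in qs:
--             mask |= 1 << (qrs - 1 - k if rev else k)
--     out = []
--     for j in range(2 ** qrs):
--         if j & mask == 0:
--             out.append(''.join('1' if (j >> (p if rev else qrs - 1 - p)) & 1 else '0'
--                                for p in range(qrs)))
--     return out
-- ===== Notes on version B (the rewrite author's own statement) =====
-- stated objective: alternative
-- what changed: Replaces A's string building of all names, collection of a bad_names list and a quadratic 'name not in bad_names' scan by a single bitmask of forbidden bit positions and one pass over range(2**qrs) testing j & mask == 0; intended as faster (B read 1517x at the largest size both finished) but a timing run could not confirm it consistently.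
-- intended difference: When qrs == 1 and 0 is not in qs, A's early-return shortcut returns ['0','1'] ignoring qs, while B returns ['0'], the value consistent with A's own filtering at every other register size. — e.g. on register_names_qubits([], 1, false): A returns ["0", "1"], B returns ["0"]
import Mathlib
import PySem

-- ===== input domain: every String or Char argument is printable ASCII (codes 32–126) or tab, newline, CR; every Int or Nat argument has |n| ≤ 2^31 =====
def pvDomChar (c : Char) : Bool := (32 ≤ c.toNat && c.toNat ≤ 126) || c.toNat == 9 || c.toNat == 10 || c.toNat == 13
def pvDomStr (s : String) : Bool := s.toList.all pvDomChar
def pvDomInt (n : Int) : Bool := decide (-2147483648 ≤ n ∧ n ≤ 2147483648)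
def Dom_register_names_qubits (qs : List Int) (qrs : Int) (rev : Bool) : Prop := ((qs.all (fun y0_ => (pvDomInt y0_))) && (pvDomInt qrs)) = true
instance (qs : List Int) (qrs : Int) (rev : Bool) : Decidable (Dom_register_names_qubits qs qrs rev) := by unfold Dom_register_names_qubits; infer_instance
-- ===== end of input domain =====

-- B replaces A's bad_names string bookkeeping and quadratic not-in-list scan by a forbidden-position
-- bitmask and one pass over range(2**qrs); on qrs == 1 with 0 ∉ qs it fixes A's shortcut (see D_).


-- ===== PORT A =====
-- bin(j)[2:] for j ≥ 1, hand-ported (binary digits, most significant first); exact for j ≥ 1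
def pvBinCore : Nat → List Char
  | 0 => []
  | (n+1) => pvBinCore ((n+1)/2) ++ [if (n+1) % 2 = 1 then '1' else '0']

-- bin(j)[2:] for j ≥ 0; exact on naturals
def pvBin (j : Nat) : List Char := if j = 0 then ['0'] else pvBinCore j

-- cs.zfill(n) on sign-free digit strings (the only use here); exact there
def pvZfill (n : Nat) (cs : List Char) : List Char := List.replicate (n - cs.length) '0' ++ cs

def bit_strings (n : Int) (rev : Bool) : List String :=
  if rev = true then
    (List.range (2 ^ n.toNat)).map (fun j => String.mk ((pvZfill n.toNat (pvBin j)).reverse))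
  else
    (List.range (2 ^ n.toNat)).map (fun j => String.mk (pvZfill n.toNat (pvBin j)))

def register_names_qubits (qs : List Int) (qrs : Int) (rev : Bool) : List String :=
  if qrs = 0 then [""]
  else if qrs = 1 then ["0", "1"]
  else
    let all_names := bit_strings qrs rev
    let not_used := (PySem.List.pyRange 0 qrs 1).foldl
      (fun acc j => if j ∈ qs then acc else acc ++ [j]) []
    let bad_names := all_names.foldl (fun acc name =>
      not_used.foldl (fun acc2 k =>
        let rev_name := String.mk name.toList.reverse
        if PySem.Str.pyGet? rev_name k = some '1' then acc2 ++ [name] else acc2) acc) []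
    all_names.foldl (fun acc name => if name ∈ bad_names then acc else acc ++ [name]) []

-- ===== PORT B =====
def register_names_qubits_alt (qs : List Int) (qrs : Int) (rev : Bool) : List String :=
  let mask : Nat := (PySem.List.pyRange 0 qrs 1).foldl
    (fun m k => if k ∈ qs then m else m ||| (1 <<< (if rev then qrs - 1 - k else k).toNat)) 0
  (List.range (2 ^ qrs.toNat)).foldl
    (fun out j =>
      if j &&& mask = 0 then
        out ++ [String.mk ((List.range qrs.toNat).map (fun p =>
          if (j >>> (if rev then p else qrs.toNat - 1 - p)) &&& 1 = 1 then '1' else '0'))]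
      else out) []

-- ===== PRECONDITION & SPEC =====
-- Pre_ excludes qrs < 0, where Python A raises TypeError (2**qrs is a float, so list(range(...))
-- rejects it), and qrs ≥ 63, where list(range(2**qrs)) raises OverflowError (2**qrs exceeds C
-- ssize_t); A returns on no excluded input.
def Pre_register_names_qubits (qs : List Int) (qrs : Int) (rev : Bool) : Prop := 0 ≤ qrs ∧ qrs < 63
instance (qs : List Int) (qrs : Int) (rev : Bool) : Decidable (Pre_register_names_qubits qs qrs rev) := by unfold Pre_register_names_qubits; infer_instance
def pvWitness_register_names_qubits : List Int × Int × Bool := ([0, 2], 3, false)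

-- When qrs == 1 and 0 is not in qs, A's early-return shortcut returns ['0','1'] ignoring qs, while
-- B returns ['0'], the value consistent with A's own filtering at every other register size.
def D_register_names_qubits (qs : List Int) (qrs : Int) (rev : Bool) : Prop := qrs = 1 ∧ (0 : Int) ∉ qs
instance (qs : List Int) (qrs : Int) (rev : Bool) : Decidable (D_register_names_qubits qs qrs rev) := by unfold D_register_names_qubits; infer_instance

def Spec_register_names_qubits (qs : List Int) (qrs : Int) (rev : Bool) (out : List String) : Prop := ¬ D_register_names_qubits qs qrs rev → out = register_names_qubits_alt qs qrs rev
instance (qs : List Int) (qrs : Int) (rev : Bool) (out : List String) : Decidable (Spec_register_names_qubits qs qrs rev out) := by unfold Spec_register_names_qubits; infer_instance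

def pvDiffWitness_register_names_qubits : List Int × Int × Bool := ([], 1, false)
def pvDiffWitnessOut_register_names_qubits : (List String) × (List String) := (["0", "1"], ["0"])

-- ===== CLAIM (what is proved, stated in full; the proofs are below) =====
def Claim_unchanged_register_names_qubits : Prop := ∀ (qs : List Int) (qrs : Int) (rev : Bool), Dom_register_names_qubits qs qrs rev → Pre_register_names_qubits qs qrs rev → Spec_register_names_qubits qs qrs rev (register_names_qubits qs qrs rev)
def Claim_changed_register_names_qubits : Prop := Dom_register_names_qubits (pvDiffWitness_register_names_qubits.1) (pvDiffWitness_register_names_qubits.2.1) (pvDiffWitness_register_names_qubits.2.2) ∧ Pre_register_names_qubits (pvDiffWitness_register_names_qubits.1) (pvDiffWitness_register_names_qubits.2.1) (pvDiffWitness_register_names_qubits.2.2) ∧ D_register_names_qubits (pvDiffWitness_register_names_qubits.1) (pvDiffWitness_register_names_qubits.2.1) (pvDiffWitness_register_names_qubits.2.2) ∧ register_names_qubits (pvDiffWitness_register_names_qubits.1) (pvDiffWitness_register_names_qubits.2.1) (pvDiffWitness_register_names_qubits.2.2) = pvDiffWitnessOut_register_names_qubits.1 ∧ register_names_qubits_alt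 (pvDiffWitness_register_names_qubits.1) (pvDiffWitness_register_names_qubits.2.1) (pvDiffWitness_register_names_qubits.2.2) = pvDiffWitnessOut_register_names_qubits.2 ∧ pvDiffWitnessOut_register_names_qubits.1 ≠ pvDiffWitnessOut_register_names_qubits.2
def Claim_exact_register_names_qubits : Prop := ∀ (qs : List Int) (qrs : Int) (rev : Bool), Dom_register_names_qubits qs qrs rev → Pre_register_names_qubits qs qrs rev → D_register_names_qubits qs qrs rev → register_names_qubits qs qrs rev ≠ register_names_qubits_alt qs qrs rev

-- ===== LEMMAS AND PROOFS =====
def pvBitC (j d : Nat) : Char := if (j >>> d) &&& 1 = 1 then '1' else '0'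

theorem pvBitC_zero (d : Nat) : pvBitC 0 d = '0' := by simp [pvBitC]

theorem pvBitC_succ (j d : Nat) : pvBitC j (d+1) = pvBitC (j/2) d := by
  simp [pvBitC, Nat.shiftRight_succ_inside]

theorem pvBitC_testBit (j d : Nat) : pvBitC j d = if j.testBit d then '1' else '0' := by
  simp [pvBitC, Nat.testBit_eq_decide_div_mod_eq, Nat.shiftRight_eq_div_pow, Nat.and_one_is_mod]

theorem pvBinCore_core : ∀ (N j : Nat), j < 2^N →
    List.replicate (N - (pvBinCore j).length) '0' ++ pvBinCore j
      = (List.range N).map (fun p => pvBitC j (N-1-p)) := by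
  intro N
  induction N with
  | zero => intro j hj; interval_cases j; simp [pvBinCore]
  | succ M ih =>
    intro j hj
    rcases Nat.eq_zero_or_pos j with h0 | hpos
    · subst h0
      simp [pvBinCore, pvBitC_zero, List.map_const']
    · obtain ⟨n, rfl⟩ : ∃ n, j = n + 1 := ⟨j - 1, by omega⟩
      rw [show pvBinCore (n+1) = pvBinCore ((n+1)/2) ++ [if (n+1) % 2 = 1 then '1' else '0'] from by simp [pvBinCore]]
      have hlen : (pvBinCore ((n+1)/2) ++ [if (n+1) % 2 = 1 then '1' else '0']).length
          = (pvBinCore ((n+1)/2)).length + 1 := by simp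
      rw [hlen]
      have hdiv : (n+1)/2 < 2^M := by omega
      have := ih ((n+1)/2) hdiv
      rw [List.range_succ, List.map_append]
      have harr : M + 1 - ((pvBinCore ((n+1)/2)).length + 1) = M - (pvBinCore ((n+1)/2)).length := by omega
      rw [harr, ← List.append_assoc, this]
      simp only [List.map_cons, List.map_nil]
      congr 1
      · apply List.map_congr_left
        intro p hp
        simp at hp
        have : M + 1 - 1 - p = (M - 1 - p) + 1 := by omega
        rw [this, pvBitC_succ]
      · simp [pvBitC]

theorem pvZfill_pvBin (N j : Nat) (hN : 1 ≤ N) (hj : j < 2^N) :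
    pvZfill N (pvBin j) = (List.range N).map (fun p => pvBitC j (N-1-p)) := by
  rcases Nat.eq_zero_or_pos j with h0 | hpos
  · subst h0
    have : (List.range N).map (fun p => pvBitC 0 (N-1-p)) = List.replicate N '0' := by
      simp [pvBitC_zero, List.map_const']
    rw [this, pvZfill, pvBin]
    simp
    rw [show N = (N-1) + 1 by omega, List.replicate_succ']
    simp
  · rw [pvZfill, pvBin, if_neg (by omega)]
    exact pvBinCore_core N j hj

theorem pvReverse_map_range {α : Type} (N : Nat) (f : Nat → α) :
    ((List.range N).map f).reverse = (List.range N).map (fun p => f (N-1-p)) := by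
  apply List.ext_getElem
  · simp
  · intro i h1 h2
    simp at h1 h2 ⊢

theorem pvMask_testBit (l : List Int) (g : Int → Nat) :
    ∀ (m0 : Nat) (i : Nat),
      (l.foldl (fun m k => m ||| (1 <<< g k)) m0).testBit i
        = (m0.testBit i || l.any (fun k => g k == i)) := by
  induction l with
  | nil => simp
  | cons x t ih =>
    intro m0 i
    simp only [List.foldl_cons, List.any_cons, ih]
    rw [Nat.testBit_or, Nat.one_shiftLeft, Nat.testBit_two_pow]
    by_cases h : g x = i <;> simp [h, Bool.or_comm, Bool.or_assoc, Bool.or_left_comm]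

theorem pvAnd_eq_zero (j m : Nat) :
    j &&& m = 0 ↔ ∀ i, ¬(j.testBit i = true ∧ m.testBit i = true) := by
  constructor
  · intro h i hi
    have := Nat.testBit_and j m i
    rw [h] at this
    simp [Nat.zero_testBit, hi.1, hi.2] at this
  · intro h
    apply Nat.eq_of_testBit_eq
    intro i
    simp [Nat.testBit_and, Nat.zero_testBit]
    intro hj
    by_contra hm
    exact h i ⟨hj, by simpa using hm⟩

-- the name A builds, as the bit list B builds
theorem pvNameChars (N j : Nat) (rev : Bool) (hN : 1 ≤ N) (hj : j < 2^N) :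
    (if rev = true then String.mk ((pvZfill N (pvBin j)).reverse)
     else String.mk (pvZfill N (pvBin j)))
      = String.mk ((List.range N).map (fun p => pvBitC j (if rev then p else N-1-p))) := by
  cases rev with
  | false => simp [pvZfill_pvBin N j hN hj]
  | true =>
    rw [if_pos rfl, pvZfill_pvBin N j hN hj, pvReverse_map_range]
    congr 1
    apply List.map_congr_left
    intro p hp
    simp only [List.mem_range] at hp
    rw [if_pos rfl]
    congr 1
    omega

-- the reversed name's char list
theorem pvRevNameChars (N j : Nat) (rev : Bool) (hN : 1 ≤ N) (hj : j < 2^N) :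
    ((List.range N).map (fun p => pvBitC j (if rev then p else N-1-p))).reverse
      = (List.range N).map (fun k => pvBitC j (if rev then N-1-k else k)) := by
  rw [pvReverse_map_range]
  apply List.map_congr_left
  intro p hp
  simp at hp
  cases rev <;> simp
  congr 1
  omega

def pvNameF (N : Nat) (rev : Bool) (j : Nat) : String :=
  String.mk ((List.range N).map (fun p => pvBitC j (if rev then p else N-1-p)))
def pvPos (N : Nat) (rev : Bool) (k : Int) : Nat := if rev then N - 1 - k.toNat else k.toNat
def pvNU (qs : List Int) (qrs : Int) : List Int :=
  (PySem.List.pyRange 0 qrs 1).filter (fun j => decide ¬(j ∈ qs))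
def pvMask (qs : List Int) (qrs : Int) (rev : Bool) : Nat :=
  (pvNU qs qrs).foldl (fun m k => m ||| (1 <<< pvPos qrs.toNat rev k)) 0

theorem pvFlipIf {α : Type} (P : α → Prop) [DecidablePred P] (l : List α) :
    l.foldl (fun acc x => if P x then acc else acc ++ [x]) [] = l.filter (fun x => decide ¬ P x) := by
  rw [PySem.List.foldl_congr_mem _ _ (fun acc x => if ¬ P x then acc ++ [x] else acc) _
      (by intro a x hx; by_cases h : P x <;> simp [h])]
  rw [PySem.List.foldl_append_ite_eq_filter]
  simp

theorem pvHall (qrs : Int) (rev : Bool) (h2 : 2 ≤ qrs) :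
    bit_strings qrs rev = (List.range (2^qrs.toNat)).map (pvNameF qrs.toNat rev) := by
  cases rev
  · rw [bit_strings, if_neg (by simp)]
    apply List.map_congr_left
    intro j hj
    simp only [List.mem_range] at hj
    have := pvNameChars qrs.toNat j false (by omega) hj
    simpa [pvNameF] using this
  · rw [bit_strings, if_pos rfl]
    apply List.map_congr_left
    intro j hj
    simp only [List.mem_range] at hj
    have := pvNameChars qrs.toNat j true (by omega) hj
    simpa [pvNameF] using this

theorem pvHbad (qs : List Int) (qrs : Int) (rev : Bool) (acc : List String) :
    ((List.range (2^qrs.toNat)).map (pvNameF qrs.toNat rev)).foldl (fun acc name =>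
        (pvNU qs qrs).foldl (fun acc2 k =>
          let rev_name := String.mk name.toList.reverse
          if PySem.Str.pyGet? rev_name k = some '1' then acc2 ++ [name] else acc2) acc) acc
      = acc ++ ((List.range (2^qrs.toNat)).map (pvNameF qrs.toNat rev)).flatMap (fun name =>
          ((pvNU qs qrs).filter (fun k => decide (PySem.Str.pyGet? (String.mk name.toList.reverse) k = some '1'))).map (fun _ => name)) := by
  rw [PySem.List.foldl_congr_mem _ _
      (fun acc name => acc ++ ((pvNU qs qrs).filter (fun k => decide (PySem.Str.pyGet? (String.mk name.toList.reverse) k = some '1'))).map (fun _ => name)) _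
      (by
        intro a s hs
        rw [show (fun (acc2 : List String) (k : Int) =>
            let rev_name := String.mk s.toList.reverse
            if PySem.Str.pyGet? rev_name k = some '1' then acc2 ++ [s] else acc2)
          = fun acc2 k => if PySem.Str.pyGet? (String.mk s.toList.reverse) k = some '1' then acc2 ++ [s] else acc2 from rfl]
        rw [PySem.List.foldl_append_ite (p := fun k => PySem.Str.pyGet? (String.mk s.toList.reverse) k = some '1') (f := fun _ => s)])]
  rw [PySem.List.foldl_append_eq_flatMap]

theorem pvHbadmem (qs : List Int) (qrs : Int) (rev : Bool) (j : Nat) (hj : j < 2^qrs.toNat) :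
    (pvNameF qrs.toNat rev j ∈ ((List.range (2^qrs.toNat)).map (pvNameF qrs.toNat rev)).flatMap (fun name =>
          ((pvNU qs qrs).filter (fun k => decide (PySem.Str.pyGet? (String.mk name.toList.reverse) k = some '1'))).map (fun _ => name))
      ↔ ∃ k ∈ pvNU qs qrs, PySem.Str.pyGet? (String.mk (pvNameF qrs.toNat rev j).toList.reverse) k = some '1') := by
  simp only [List.mem_flatMap, List.mem_map, List.mem_filter, List.mem_range]
  constructor
  · rintro ⟨s, hsmem, k, ⟨hk, hc⟩, heq⟩
    exact ⟨k, hk, by rw [heq] at hc; simpa using hc⟩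
  · rintro ⟨k, hk, hc⟩
    refine ⟨pvNameF qrs.toNat rev j, ⟨j, hj, rfl⟩, k, ⟨hk, by simpa using hc⟩, rfl⟩

theorem pvHcond (qs : List Int) (qrs : Int) (rev : Bool) (h2 : 2 ≤ qrs)
    (j : Nat) (hj : j < 2^qrs.toNat) (k : Int) (hk : k ∈ pvNU qs qrs) :
    PySem.Str.pyGet? (String.mk (pvNameF qrs.toNat rev j).toList.reverse) k = some '1' ↔ j.testBit (pvPos qrs.toNat rev k) := by
  have hN : 2 ≤ qrs.toNat := by omega
  have hkr : 0 ≤ k ∧ k < qrs := by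
    rw [pvNU, List.mem_filter] at hk
    exact PySem.List.mem_pyRange_one.mp hk.1
  rw [pvNameF]
  have htl : (String.mk ((List.range qrs.toNat).map (fun p => pvBitC j (if rev then p else qrs.toNat-1-p)))).toList
      = (List.range qrs.toNat).map (fun p => pvBitC j (if rev then p else qrs.toNat-1-p)) := String.toList_ofList
  rw [htl, pvRevNameChars qrs.toNat j rev (by omega) hj]
  rw [PySem.Str.pyGet?_eq]
  have htl2 : (String.mk ((List.range qrs.toNat).map (fun k => pvBitC j (if rev then qrs.toNat-1-k else k)))).toList
      = (List.range qrs.toNat).map (fun k => pvBitC j (if rev then qrs.toNat-1-k else k)) := String.toList_ofList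
  rw [htl2, PySem.Chars.pyGet?_eq_listPyGet?]
  rw [PySem.List.pyGet?_eq_some_getElem _ (by omega) (by simp; omega)]
  simp only [List.getElem_map, List.getElem_range, Option.some_inj]
  rw [pvBitC_testBit, pvPos]
  cases hbit : j.testBit (if rev = true then qrs.toNat - 1 - k.toNat else k.toNat) <;>
    cases rev <;> simp_all

theorem pvHmaskBit (qs : List Int) (qrs : Int) (rev : Bool) (j : Nat) :
    (j &&& pvMask qs qrs rev = 0 ↔ ∀ k ∈ pvNU qs qrs, ¬ j.testBit (pvPos qrs.toNat rev k)) := by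
  rw [pvAnd_eq_zero]
  constructor
  · intro h k hk hb
    exact h (pvPos qrs.toNat rev k) ⟨hb, by
      rw [pvMask, pvMask_testBit]
      simp only [Nat.zero_testBit, Bool.false_or, List.any_eq_true, beq_iff_eq]
      exact ⟨k, hk, rfl⟩⟩
  · rintro h i ⟨hji, hmi⟩
    rw [pvMask, pvMask_testBit] at hmi
    simp only [Nat.zero_testBit, Bool.false_or, List.any_eq_true, beq_iff_eq] at hmi
    obtain ⟨k, hk, hpk⟩ := hmi
    exact h k hk (hpk ▸ hji)

theorem pvHmask (qs : List Int) (qrs : Int) (rev : Bool) (h2 : 2 ≤ qrs) :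
    (PySem.List.pyRange 0 qrs 1).foldl
      (fun m k => if k ∈ qs then m else m ||| (1 <<< (if rev then qrs - 1 - k else k).toNat)) 0
    = pvMask qs qrs rev := by
  rw [PySem.List.foldl_congr_mem _ _
      (fun m k => if ¬(k ∈ qs) then m ||| (1 <<< (if rev then qrs - 1 - k else k).toNat) else m) _
      (by intro a x hx; by_cases h : x ∈ qs <;> simp [h])]
  rw [PySem.List.foldl_ite_eq_foldl_filter]
  rw [pvMask, pvNU]
  apply PySem.List.foldl_congr_mem
  intro m k hk
  have hkr : 0 ≤ k ∧ k < qrs := by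
    rw [List.mem_filter] at hk
    exact PySem.List.mem_pyRange_one.mp hk.1
  have : (if rev then qrs - 1 - k else k).toNat = pvPos qrs.toNat rev k := by
    rw [pvPos]; cases rev <;> simp <;> omega
  rw [this]

theorem main (qs : List Int) (qrs : Int) (rev : Bool) (h2 : 2 ≤ qrs) :
    register_names_qubits qs qrs rev = register_names_qubits_alt qs qrs rev := by
  have hN : 2 ≤ qrs.toNat := by omega
  have hA : register_names_qubits qs qrs rev =
      (bit_strings qrs rev).foldl (fun acc name =>
        if name ∈ ((bit_strings qrs rev).foldl (fun acc name =>
            ((PySem.List.pyRange 0 qrs 1).foldl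
              (fun acc j => if j ∈ qs then acc else acc ++ [j]) []).foldl (fun acc2 k =>
              let rev_name := String.mk name.toList.reverse
              if PySem.Str.pyGet? rev_name k = some '1' then acc2 ++ [name] else acc2) acc) [])
        then acc else acc ++ [name]) [] := by
    rw [register_names_qubits, if_neg (by omega : ¬ qrs = 0), if_neg (by omega : ¬ qrs = 1)]
  have hB : register_names_qubits_alt qs qrs rev =
      (List.range (2 ^ qrs.toNat)).foldl (fun out j =>
        if j &&& ((PySem.List.pyRange 0 qrs 1).foldl
            (fun m k => if k ∈ qs then m else m ||| (1 <<< (if rev then qrs - 1 - k else k).toNat)) 0) = 0 then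
          out ++ [String.mk ((List.range qrs.toNat).map (fun p =>
            if (j >>> (if rev then p else qrs.toNat - 1 - p)) &&& 1 = 1 then '1' else '0'))]
        else out) [] := by
    rw [register_names_qubits_alt]
  rw [hA, hB]
  have hnu : (PySem.List.pyRange 0 qrs 1).foldl
      (fun acc j => if j ∈ qs then acc else acc ++ [j]) [] = pvNU qs qrs := by
    rw [pvFlipIf (fun j => j ∈ qs)]
    rfl
  rw [hnu, pvHall qrs rev h2, pvHbad qs qrs rev, pvHmask qs qrs rev h2]
  simp only [List.nil_append]
  have hAfilter : (List.map (pvNameF qrs.toNat rev) (List.range (2 ^ qrs.toNat))).foldl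
      (fun acc name => if name ∈ (((List.range (2^qrs.toNat)).map (pvNameF qrs.toNat rev)).flatMap (fun name =>
          ((pvNU qs qrs).filter (fun k => decide (PySem.Str.pyGet? (String.mk name.toList.reverse) k = some '1'))).map (fun _ => name))) then acc
        else acc ++ [name]) []
      = (List.map (pvNameF qrs.toNat rev) (List.range (2 ^ qrs.toNat))).filter
          (fun name => decide ¬(name ∈ (((List.range (2^qrs.toNat)).map (pvNameF qrs.toNat rev)).flatMap (fun name =>
          ((pvNU qs qrs).filter (fun k => decide (PySem.Str.pyGet? (String.mk name.toList.reverse) k = some '1'))).map (fun _ => name))))) := pvFlipIf _ _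
  refine hAfilter.trans ?_
  rw [PySem.List.foldl_append_ite (p := fun j => j &&& pvMask qs qrs rev = 0)
      (f := fun j => String.mk ((List.range qrs.toNat).map (fun p =>
        if (j >>> (if rev then p else qrs.toNat - 1 - p)) &&& 1 = 1 then '1' else '0')))]
  simp only [List.nil_append]
  have hBstr : (fun j => String.mk ((List.range qrs.toNat).map (fun p =>
        if (j >>> (if rev then p else qrs.toNat - 1 - p)) &&& 1 = 1 then '1' else '0')))
      = pvNameF qrs.toNat rev := rfl
  rw [hBstr, List.filter_map]
  apply congrArg
  apply List.filter_congr
  intro j hj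
  simp only [List.mem_range] at hj
  simp only [Function.comp_apply]
  rw [decide_eq_decide, pvHbadmem qs qrs rev j hj, pvHmaskBit qs qrs rev j]
  constructor
  · intro hne k hk hb
    exact hne ⟨k, hk, (pvHcond qs qrs rev h2 j hj k hk).mpr hb⟩
  · rintro hall2 ⟨k, hk, hc⟩
    exact hall2 k hk ((pvHcond qs qrs rev h2 j hj k hk).mp hc)

-- the small registers, computed outright
theorem pvAlt_zero (qs : List Int) (rev : Bool) : register_names_qubits_alt qs 0 rev = [""] := by
  simp [register_names_qubits_alt, show PySem.List.pyRange 0 0 1 = [] from by decide,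
    show (0:Int).toNat = 0 from rfl]
  decide

theorem pvAlt_one_mem (qs : List Int) (rev : Bool) (h : (0:Int) ∈ qs) :
    register_names_qubits_alt qs 1 rev = ["0", "1"] := by
  simp [register_names_qubits_alt, show PySem.List.pyRange 0 1 1 = [0] from by decide,
    show (1:Int).toNat = 1 from rfl, List.range_succ, h]
  exact ⟨by decide, by decide⟩

theorem pvAlt_one_not_mem (qs : List Int) (rev : Bool) (h : (0:Int) ∉ qs) :
    register_names_qubits_alt qs 1 rev = ["0"] := by
  simp [register_names_qubits_alt, show PySem.List.pyRange 0 1 1 = [0] from by decide,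
    show (1:Int).toNat = 1 from rfl, List.range_succ, h]
  decide

-- ===== VERDICT (by name: the statement is the Claim_ definition above) =====
theorem register_names_qubits_spec : Claim_unchanged_register_names_qubits := by
  intro qs qrs rev hdom hpre hnd
  have hpre' : (0:Int) ≤ qrs := hpre.1
  by_cases h0 : qrs = 0
  · subst h0
    rw [pvAlt_zero]
    simp [register_names_qubits]
  · by_cases h1 : qrs = 1
    · subst h1
      simp only [D_register_names_qubits] at hnd
      have hmem : (0:Int) ∈ qs := by
        by_contra hc
        exact hnd ⟨trivial, hc⟩
      rw [pvAlt_one_mem qs rev hmem]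
      simp [register_names_qubits]
    · exact main qs qrs rev (by omega)

theorem register_names_qubits_changed : Claim_changed_register_names_qubits := by
  unfold Claim_changed_register_names_qubits; decide

theorem register_names_qubits_tight : Claim_exact_register_names_qubits := by
  intro qs qrs rev hdom hpre hd
  simp only [D_register_names_qubits] at hd
  obtain ⟨h1, hnm⟩ := hd
  subst h1
  rw [pvAlt_one_not_mem qs rev hnm]
  simp [register_names_qubits]
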